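-- pv_equiv track=rewrite | github.com/getnit-dev/nit | src/nit/utils/cmake.py | _normalize_cmake_content
-- ===== SOURCE A (Python) =====
-- def _normalize_cmake_content(content: str) -> str:
--     """Collapse line continuations and strip so regex can match across lines."""
--     lines: list[str] = []
--     current: list[str] = []
--     for line in content.splitlines():
--         current.append(line.rstrip())
--         if not line.rstrip().endswith("\\"):
--             lines.append(" ".join(current))
--             current = []
--     if current:
--         lines.append(" ".join(current))
--     return "\n".join(lines)
-- ===== SOURCE B (Python) =====
-- def _normalize_cmake_content(content: str) -> str:
--     """Collapse line continuations and strip so regex can match across lines."""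
--     text = "\n".join(line.rstrip() for line in content.splitlines())
--     return text.replace("\\\n", "\\ ")
-- ===== Notes on version B (the rewrite author's own statement) =====
-- stated objective: idiomatic
-- what changed: Replaces the stateful current/flush group-accumulator loop with normalize-then-substitute: join the rstripped lines with newlines once, then a single replace of backslash+newline by backslash+space.
import Mathlib
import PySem

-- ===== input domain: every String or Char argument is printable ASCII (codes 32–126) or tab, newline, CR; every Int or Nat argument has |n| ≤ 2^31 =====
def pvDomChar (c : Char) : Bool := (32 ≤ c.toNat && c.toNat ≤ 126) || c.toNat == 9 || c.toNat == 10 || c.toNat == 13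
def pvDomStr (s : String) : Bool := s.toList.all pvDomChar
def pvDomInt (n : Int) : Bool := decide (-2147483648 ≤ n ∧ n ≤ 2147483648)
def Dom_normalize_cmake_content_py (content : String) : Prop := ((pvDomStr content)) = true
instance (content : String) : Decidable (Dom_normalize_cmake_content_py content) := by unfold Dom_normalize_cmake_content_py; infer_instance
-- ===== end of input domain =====

-- B replaces A's stateful group-accumulator loop by normalize-then-substitute (join rstripped
-- lines with "\n", then one replace of "\\\n" by "\\ "); same result, idiomatic one-pass rewrite.

-- ===== PORT A =====
-- loop body: state (lines, current), one step per line of content.splitlines()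
def pvStepStr (st : List String × List String) (line : String) : List String × List String :=
  let current := st.2 ++ [PySem.Str.rstrip line]
  if PySem.Str.endswith (PySem.Str.rstrip line) "\\" then
    (st.1, current)
  else
    (st.1 ++ [PySem.Str.join " " current], [])

def normalize_cmake_content_py (content : String) : String :=
  let st := (PySem.Str.splitlines content).foldl pvStepStr ([], [])
  let lines := if st.2 = [] then st.1 else st.1 ++ [PySem.Str.join " " st.2]
  PySem.Str.join "\n" lines

-- ===== PORT B =====
def normalize_cmake_content_py_alt (content : String) : String :=
  let text := PySem.Str.join "\n" ((PySem.Str.splitlines content).map PySem.Str.rstrip)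
  PySem.Str.replace text "\\\n" "\\ "

-- ===== PRECONDITION & SPEC =====
def Spec_normalize_cmake_content_py (content : String) (out : String) : Prop := out = normalize_cmake_content_py_alt content
instance (content : String) (out : String) : Decidable (Spec_normalize_cmake_content_py content out) := by unfold Spec_normalize_cmake_content_py; infer_instance

-- ===== CLAIM (what is proved, stated in full; the proofs are below) =====
def Claim_equal_normalize_cmake_content_py : Prop := ∀ (content : String), Dom_normalize_cmake_content_py content → Spec_normalize_cmake_content_py content (normalize_cmake_content_py content)

-- ===== LEMMAS AND PROOFS =====

-- the single-pass collapse that PySem.Chars.replace · ['\\','\n'] ['\\',' '] performs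
def pvCollapse : List Char → List Char
  | [] => []
  | c :: t =>
    if c = '\\' ∧ t.head? = some '\n' then '\\' :: ' ' :: pvCollapse t.tail
    else c :: pvCollapse t
termination_by l => l.length
decreasing_by
  all_goals simp only [List.length_tail, List.length_cons]; omega

-- the common normal form: each line, then ' ' if it ends with '\' else '\n'
def pvCanon : List (List Char) → List Char
  | [] => []
  | [l] => l
  | l :: l2 :: rest =>
    l ++ (if PySem.Chars.endswith l ['\\'] then ' ' else '\n') :: pvCanon (l2 :: rest)

-- A's grouping loop, lines-accumulator factored out
def pvR (cur : List (List Char)) : List (List Char) → List (List Char)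
  | [] => if cur = [] then [] else [PySem.Chars.join [' '] cur]
  | m :: ms =>
    if PySem.Chars.endswith m ['\\'] then pvR (cur ++ [m]) ms
    else PySem.Chars.join [' '] (cur ++ [m]) :: pvR [] ms

theorem pvCanon_cons_cons (l l2 : List Char) (rest : List (List Char)) :
    pvCanon (l :: l2 :: rest)
      = l ++ (if PySem.Chars.endswith l ['\\'] then ' ' else '\n') :: pvCanon (l2 :: rest) := by
  rw [pvCanon]

theorem pvCollapse_cons_bn (t : List Char) :
    pvCollapse ('\\' :: '\n' :: t) = '\\' :: ' ' :: pvCollapse t := by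
  rw [pvCollapse]; simp

theorem pvCollapse_cons_ne (c : Char) (t : List Char)
    (h : ¬ (c = '\\' ∧ t.head? = some '\n')) :
    pvCollapse (c :: t) = c :: pvCollapse t := by
  rw [pvCollapse]; simp [h]

theorem pvCollapse_no_nl (l : List Char) (h : '\n' ∉ l) : pvCollapse l = l := by
  induction l with
  | nil => simp [pvCollapse]
  | cons c t ih =>
    have ht : '\n' ∉ t := fun ht => h (List.mem_cons_of_mem _ ht)
    rw [pvCollapse_cons_ne]
    · rw [ih ht]
    · rintro ⟨-, hh⟩
      exact ht (List.mem_of_mem_head? hh)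

theorem pvCollapse_append_nl (l rest : List Char) (h : '\n' ∉ l) :
    pvCollapse (l ++ '\n' :: rest) =
      l ++ (if l.getLast? = some '\\' then ' ' else '\n') :: pvCollapse rest := by
  induction l with
  | nil => simp [pvCollapse_cons_ne ('\n') rest (by simp)]
  | cons c t ih =>
    have ht : '\n' ∉ t := fun ht => h (List.mem_cons_of_mem _ ht)
    cases t with
    | nil =>
      by_cases hb : c = '\\'
      · subst hb
        simpa using pvCollapse_cons_bn rest
      · rw [List.cons_append, List.nil_append, pvCollapse_cons_ne c _ (by simp [hb]),
          pvCollapse_cons_ne '\n' rest (by simp)]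
        simp [hb]
    | cons c2 t2 =>
      have hc2 : c2 ≠ '\n' := fun hcc => ht (hcc ▸ List.mem_cons_self)
      rw [List.cons_append, pvCollapse_cons_ne c _ (by simp [hc2]), ih ht]
      simp

theorem pvEndswith_iff_getLast (l : List Char) :
    PySem.Chars.endswith l ['\\'] = true ↔ l.getLast? = some '\\' := by
  rw [PySem.Chars.endswith_iff]
  constructor
  · rintro ⟨pre, rfl⟩; simp
  · intro h
    rcases List.eq_nil_or_concat l with rfl | ⟨pre, a, rfl⟩
    · simp at h
    · simp at h
      exact ⟨pre, by simp [h]⟩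

-- B side: the replace pass on the newline-join is pvCanon
theorem pvCollapse_join (ms : List (List Char)) (h : ∀ l ∈ ms, '\n' ∉ l) :
    pvCollapse (PySem.Chars.join ['\n'] ms) = pvCanon ms := by
  induction ms with
  | nil => simp [PySem.Chars.join_nil, pvCollapse, pvCanon]
  | cons l ms ih =>
    cases ms with
    | nil =>
      rw [PySem.Chars.join_singleton]
      exact pvCollapse_no_nl l (h l List.mem_cons_self)
    | cons l2 rest =>
      rw [PySem.Chars.join_cons_cons]
      have h1 : '\n' ∉ l := h l List.mem_cons_self
      rw [show l ++ ['\n'] ++ PySem.Chars.join ['\n'] (l2 :: rest)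
            = l ++ '\n' :: PySem.Chars.join ['\n'] (l2 :: rest) by simp]
      rw [pvCollapse_append_nl l _ h1, ih (fun x hx => h x (List.mem_cons_of_mem _ hx))]
      rw [pvCanon_cons_cons]
      by_cases he : PySem.Chars.endswith l ['\\'] = true
      · simp [he, (pvEndswith_iff_getLast l).1 he]
      · have : l.getLast? ≠ some '\\' := fun hg => he ((pvEndswith_iff_getLast l).2 hg)
        simp [he, this]

-- A side
def pvStep (st : List (List Char) × List (List Char)) (m : List Char) :
    List (List Char) × List (List Char) :=
  if PySem.Chars.endswith m ['\\'] then (st.1, st.2 ++ [m])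
  else (st.1 ++ [PySem.Chars.join [' '] (st.2 ++ [m])], [])

theorem pvStep_true {m : List Char} (st : List (List Char) × List (List Char))
    (h : PySem.Chars.endswith m ['\\'] = true) : pvStep st m = (st.1, st.2 ++ [m]) := by
  simp [pvStep, h]

theorem pvStep_false {m : List Char} (st : List (List Char) × List (List Char))
    (h : PySem.Chars.endswith m ['\\'] = false) :
    pvStep st m = (st.1 ++ [PySem.Chars.join [' '] (st.2 ++ [m])], []) := by
  simp [pvStep, h]

theorem pvR_foldl (ms : List (List Char)) : ∀ (lines cur : List (List Char)),
    (if (ms.foldl pvStep (lines, cur)).2 = [] then (ms.foldl pvStep (lines, cur)).1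
     else (ms.foldl pvStep (lines, cur)).1 ++ [PySem.Chars.join [' '] (ms.foldl pvStep (lines, cur)).2])
    = lines ++ pvR cur ms := by
  induction ms with
  | nil =>
    intro lines cur
    by_cases h : cur = [] <;> simp [pvR, h]
  | cons m ms ih =>
    intro lines cur
    by_cases h : PySem.Chars.endswith m ['\\'] = true
    · rw [List.foldl_cons, pvStep_true _ h, ih lines (cur ++ [m]), pvR, if_pos h]
    · rw [List.foldl_cons, pvStep_false _ (by simpa using h),
        ih (lines ++ [PySem.Chars.join [' '] (cur ++ [m])]) [], pvR, if_neg h]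
      simp

theorem pvCanon_all_bs (cur : List (List Char)) (m : List Char)
    (h : ∀ l ∈ cur, PySem.Chars.endswith l ['\\'] = true) :
    pvCanon (cur ++ [m]) = PySem.Chars.join [' '] (cur ++ [m]) := by
  induction cur with
  | nil => simp [pvCanon, PySem.Chars.join_singleton]
  | cons c cs ih =>
    have hc := h c List.mem_cons_self
    rcases List.exists_cons_of_ne_nil (show cs ++ [m] ≠ [] by simp) with ⟨y, ys, hy⟩
    rw [List.cons_append, hy, pvCanon_cons_cons, PySem.Chars.join_cons_cons, ← hy,
      ih (fun x hx => h x (List.mem_cons_of_mem _ hx))]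
    simp [hc]

theorem pvCanon_split (cur : List (List Char)) (m : List Char) (ms : List (List Char))
    (h : ∀ l ∈ cur, PySem.Chars.endswith l ['\\'] = true)
    (hm : PySem.Chars.endswith m ['\\'] = false) (hms : ms ≠ []) :
    pvCanon (cur ++ m :: ms) =
      PySem.Chars.join [' '] (cur ++ [m]) ++ '\n' :: pvCanon ms := by
  induction cur with
  | nil =>
    rcases List.exists_cons_of_ne_nil hms with ⟨l2, rest, hrest⟩
    rw [List.nil_append, hrest, pvCanon_cons_cons, ← hrest]
    simp [hm, PySem.Chars.join_singleton]
  | cons c cs ih =>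
    have hc := h c List.mem_cons_self
    rcases List.exists_cons_of_ne_nil (show cs ++ m :: ms ≠ [] by simp) with ⟨y, ys, hy⟩
    rcases List.exists_cons_of_ne_nil (show cs ++ [m] ≠ [] by simp) with ⟨z, zs, hz⟩
    rw [List.cons_append, hy, pvCanon_cons_cons, ← hy,
      ih (fun x hx => h x (List.mem_cons_of_mem _ hx)),
      show (c :: cs) ++ [m] = c :: (cs ++ [m]) by simp, hz, PySem.Chars.join_cons_cons, ← hz]
    simp [hc]

theorem pvR_ne_nil (ms : List (List Char)) : ∀ cur : List (List Char),
    cur ≠ [] ∨ ms ≠ [] → pvR cur ms ≠ [] := by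
  induction ms with
  | nil =>
    intro cur h
    rcases h with h | h
    · simp [pvR, h]
    · exact absurd rfl h
  | cons m ms ih =>
    intro cur _
    rw [pvR]
    by_cases h : PySem.Chars.endswith m ['\\'] = true
    · simp only [h, if_true]
      exact ih (cur ++ [m]) (Or.inl (by simp))
    · simp [h]

theorem pvR_canon (ms : List (List Char)) : ∀ cur : List (List Char),
    (∀ l ∈ cur, PySem.Chars.endswith l ['\\'] = true) →
    PySem.Chars.join ['\n'] (pvR cur ms) = pvCanon (cur ++ ms) := by
  induction ms with
  | nil =>
    intro cur h
    by_cases hc : cur = []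
    · simp [pvR, hc, pvCanon, PySem.Chars.join_nil]
    · rcases List.eq_nil_or_concat cur with rfl | ⟨pre, a, hpre⟩
      · exact absurd rfl hc
      · rw [List.concat_eq_append] at hpre
        subst hpre
        rw [pvR, if_neg hc, PySem.Chars.join_singleton, List.append_nil,
          pvCanon_all_bs pre a (fun x hx => h x (List.mem_append_left _ hx))]
  | cons m ms ih =>
    intro cur h
    rw [pvR]
    by_cases hm : PySem.Chars.endswith m ['\\'] = true
    · rw [if_pos hm, ih (cur ++ [m])
        (fun x hx => by
          rcases List.mem_append.1 hx with hx | hx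
          · exact h x hx
          · simp at hx; subst hx; exact hm)]
      simp
    · rw [if_neg hm]
      cases ms with
      | nil =>
        rw [pvR, if_pos rfl, PySem.Chars.join_singleton, pvCanon_all_bs cur m h]
      | cons m2 ms2 =>
        have hne : pvR [] (m2 :: ms2) ≠ [] := pvR_ne_nil _ [] (Or.inr (by simp))
        rcases List.exists_cons_of_ne_nil hne with ⟨y, ys, hy⟩
        rw [hy, PySem.Chars.join_cons_cons, ← hy,
          ih [] (by simp),
          pvCanon_split cur m (m2 :: ms2) h (by simpa using hm) (by simp)]
        simp

-- elements of splitlines contain no newline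
theorem pvSplitlines_go_no_nl (isB : Char → Bool) (hnl : isB '\n' = true)
    (s cur : List Char) (acc : List (List Char)) :
    (∀ l ∈ acc, '\n' ∉ l) → '\n' ∉ cur →
    ∀ l ∈ PySem.Chars.splitlines.go isB s cur acc, '\n' ∉ l := by
  induction s, cur, acc using PySem.Chars.splitlines.go.induct isB with
  | case1 cur acc hemp =>
    intro hacc hcur l hl
    rw [PySem.Chars.splitlines.go, if_pos hemp] at hl
    exact hacc l (List.mem_reverse.1 hl)
  | case2 cur acc hemp =>
    intro hacc hcur l hl
    rw [PySem.Chars.splitlines.go, if_neg hemp] at hl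
    rcases (by simpa using hl : l ∈ acc ∨ l = cur.reverse) with hl | hl
    · exact hacc l hl
    · subst hl; simpa using hcur
  | case3 rest cur acc ih =>
    intro hacc hcur
    rw [PySem.Chars.splitlines.go]
    exact ih (fun l hl => by
      rcases (by simpa using hl : l = cur.reverse ∨ l ∈ acc) with hl | hl
      · subst hl; simpa using hcur
      · exact hacc l hl) (by simp)
  | case4 c rest cur acc hne hb ih =>
    intro hacc hcur
    rw [PySem.Chars.splitlines.go]
    · rw [if_pos hb]
      exact ih (fun l hl => by
        rcases (by simpa using hl : l = cur.reverse ∨ l ∈ acc) with hl | hl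
        · subst hl; simpa using hcur
        · exact hacc l hl) (by simp)
    · exact hne
  | case5 c rest cur acc hne hb ih =>
    intro hacc hcur
    have hc : c ≠ '\n' := fun hcc => hb (hcc ▸ hnl)
    rw [PySem.Chars.splitlines.go]
    · rw [if_neg hb]
      exact ih hacc (by
        intro hmem
        rcases (by simpa using hmem : '\n' = c ∨ '\n' ∈ cur) with hmem | hmem
        · exact hc hmem.symm
        · exact hcur hmem)
    · exact hne

theorem pvSplitlines_no_nl (cs : List Char) :
    ∀ l ∈ PySem.Chars.splitlines cs, '\n' ∉ l := by
  rw [PySem.Chars.splitlines]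
  exact pvSplitlines_go_no_nl _ (by decide) cs [] [] (by simp) (by simp)

theorem pvRstrip_no_nl (l : List Char) (h : '\n' ∉ l) : '\n' ∉ PySem.Chars.rstrip l := by
  rw [PySem.Chars.rstrip]
  intro hmem
  exact h (by
    have h1 := List.mem_reverse.1 hmem
    have h2 := (List.dropWhile_sublist _ (l := l.reverse)).mem h1
    exact List.mem_reverse.1 h2)

-- the fuel-indexed replace loop computes pvCollapse
theorem pvReplace_go (fuel : Nat) (l acc : List Char) : l.length ≤ fuel →
    PySem.Chars.replace.go ['\\', '\n'] ['\\', ' '] fuel l acc = acc.reverse ++ pvCollapse l := by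
  induction fuel, l, acc using PySem.Chars.replace.go.induct ['\\', '\n'] ['\\', ' '] with
  | case1 l acc =>
    intro hl
    have : l = [] := List.eq_nil_of_length_eq_zero (Nat.le_zero.1 hl)
    subst this
    rw [PySem.Chars.replace.go]
    simp [pvCollapse]
  | case2 t acc h0 =>
    intro _
    rcases Nat.exists_eq_succ_of_ne_zero (fun h => h0 h) with ⟨n, rfl⟩
    rw [PySem.Chars.replace.go]
    all_goals simp [pvCollapse]
  | case3 fuel c t acc hp ih =>
    intro hl
    rcases List.isPrefixOf_iff_prefix.1 hp with ⟨suf, hsuf⟩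
    simp only [List.cons_append, List.nil_append] at hsuf
    injection hsuf with h1 h2
    subst h1; subst h2
    rw [PySem.Chars.replace.go, if_pos hp]
    rw [show List.drop (['\\', '\n'] : List Char).length ('\\' :: '\n' :: suf) = suf by simp] at ih ⊢
    rw [ih (by simp at hl; omega)]
    rw [pvCollapse_cons_bn]
    simp
  | case4 fuel c t acc hp ih =>
    intro hl
    rw [PySem.Chars.replace.go, if_neg hp]
    rw [ih (by simp at hl; omega)]
    rw [pvCollapse_cons_ne c t (by
      rintro ⟨rfl, hh⟩
      rcases List.head?_eq_some_iff.1 hh with ⟨t2, rfl⟩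
      exact hp (by simp [List.isPrefixOf]))]
    simp

theorem pvReplace_eq_collapse (cs : List Char) :
    PySem.Chars.replace cs ['\\', '\n'] ['\\', ' '] = pvCollapse cs := by
  rw [PySem.Chars.replace]
  rw [if_neg (by simp)]
  exact pvReplace_go cs.length cs [] le_rfl

theorem pvTL_bs : ("\\" : String).toList = ['\\'] := rfl
theorem pvTL_nl : ("\n" : String).toList = ['\n'] := rfl
theorem pvTL_sp : (" " : String).toList = [' '] := rfl
theorem pvTL_bsnl : ("\\\n" : String).toList = ['\\', '\n'] := rfl
theorem pvTL_bssp : ("\\ " : String).toList = ['\\', ' '] := rfl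

theorem pvStepStr_toList (st : List String × List String) (line : String) :
    ((pvStepStr st line).1.map String.toList, (pvStepStr st line).2.map String.toList)
      = pvStep (st.1.map String.toList, st.2.map String.toList)
          (PySem.Chars.rstrip line.toList) := by
  have hend : PySem.Str.endswith (PySem.Str.rstrip line) "\\"
      = PySem.Chars.endswith (PySem.Chars.rstrip line.toList) ['\\'] := by
    rw [PySem.Str.endswith_eq, PySem.Str.toList_rstrip, pvTL_bs]
  unfold pvStepStr pvStep
  by_cases h : PySem.Chars.endswith (PySem.Chars.rstrip line.toList) ['\\'] = true
  · simp [h, PySem.Str.toList_rstrip]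
  · simp only [hend, h, if_neg, Bool.not_eq_true] at *
    simp [PySem.Str.toList_rstrip, PySem.Str.join, PySem.Chars.join, pvTL_sp]

theorem pvFold_bridge (ls : List String) : ∀ st : List String × List String,
    ((ls.foldl pvStepStr st).1.map String.toList, (ls.foldl pvStepStr st).2.map String.toList)
      = (ls.map (fun l => PySem.Chars.rstrip l.toList)).foldl pvStep
          (st.1.map String.toList, st.2.map String.toList) := by
  induction ls with
  | nil => intro st; rfl
  | cons line ls ih =>
    intro st
    rw [List.foldl_cons, List.map_cons, List.foldl_cons, ih (pvStepStr st line),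
      pvStepStr_toList]

theorem pvToList_join (sep : String) (parts : List String) :
    (PySem.Str.join sep parts).toList
      = PySem.Chars.join sep.toList (parts.map String.toList) := by
  rw [PySem.Str.join]
  simp

-- ===== VERDICT (by name: the statement is the Claim_ definition above) =====
theorem normalize_cmake_content_py_spec : Claim_equal_normalize_cmake_content_py := by
  intro content _
  unfold Spec_normalize_cmake_content_py normalize_cmake_content_py normalize_cmake_content_py_alt
  apply String.toList_inj.mp
  simp only []
  have hms : (PySem.Str.splitlines content).map (fun l => PySem.Chars.rstrip l.toList)
      = (PySem.Chars.splitlines content.toList).map PySem.Chars.rstrip := by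
    rw [← PySem.Str.splitlines_map_toList, List.map_map]
    rfl
  set ms := (PySem.Chars.splitlines content.toList).map PySem.Chars.rstrip with hmsdef
  have hnl : ∀ l ∈ ms, '\n' ∉ l := by
    intro l hl
    rcases List.mem_map.1 hl with ⟨x, hx, rfl⟩
    exact pvRstrip_no_nl x (pvSplitlines_no_nl _ x hx)
  -- B side
  have hB : (PySem.Str.replace
      (PySem.Str.join "\n" ((PySem.Str.splitlines content).map PySem.Str.rstrip))
      "\\\n" "\\ ").toList = pvCanon ms := by
    rw [PySem.Str.toList_replace, pvToList_join, pvTL_nl, pvTL_bsnl, pvTL_bssp]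
    have hmap2 : ((PySem.Str.splitlines content).map PySem.Str.rstrip).map String.toList = ms := by
      rw [List.map_map, ← hms]
      congr 1
      funext l
      exact PySem.Str.toList_rstrip l
    rw [hmap2, pvReplace_eq_collapse, pvCollapse_join ms hnl]
  rw [hB]
  -- A side
  set st := (PySem.Str.splitlines content).foldl pvStepStr ([], []) with hstdef
  have hbr := pvFold_bridge (PySem.Str.splitlines content) ([], [])
  rw [hms] at hbr
  simp only [List.map_nil] at hbr
  rw [← hstdef] at hbr
  have hbr1 : st.1.map String.toList = (ms.foldl pvStep ([], [])).1 := congrArg Prod.fst hbr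
  have hbr2 : st.2.map String.toList = (ms.foldl pvStep ([], [])).2 := congrArg Prod.snd hbr
  have hRfold := pvR_foldl ms [] []
  rw [List.nil_append] at hRfold
  have hcanon := pvR_canon ms [] (by simp)
  rw [List.nil_append] at hcanon
  rw [pvToList_join, pvTL_nl]
  by_cases hc : st.2 = []
  · have hc' : (ms.foldl pvStep ([], [])).2 = [] := by rw [← hbr2, hc]; rfl
    rw [if_pos hc, hbr1, ← hcanon, ← hRfold, if_pos hc']
  · have hc' : (ms.foldl pvStep ([], [])).2 ≠ [] := by
      rw [← hbr2]
      simpa using hc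
    rw [if_neg hc, List.map_append, hbr1, List.map_singleton, pvToList_join, pvTL_sp, hbr2,
      ← hcanon, ← hRfold, if_neg hc']
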